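-- pv_equiv track=rewrite | github.com/FJingxian/JanusX | python/janusx/script/update.py | _looks_like_timeout
-- ===== SOURCE A (Python) =====
-- def _looks_like_timeout(output: str) -> bool:
--     text = str(output).lower()
--     timeout_tokens = (
--         "timed out",
--         "readtimeout",
--         "connect timeout",
--         "connection timed out",
--         "operation timed out",
--         "timeouterror",
--     )
--     return any(token in text for token in timeout_tokens)
-- ===== SOURCE B (Python) =====
-- def _looks_like_timeout(output: str) -> bool:
--     # Single pass over the text: at each position, dispatch on the current
--     # character to the tokens that can start there, instead of one substring
--     # scan per token.
--     text = str(output).lower()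
--     by_first = {
--         "t": ("timed out", "timeouterror"),
--         "r": ("readtimeout",),
--         "c": ("connect timeout", "connection timed out"),
--         "o": ("operation timed out",),
--     }
--     for i, ch in enumerate(text):
--         for tok in by_first.get(ch, ()):
--             if text.startswith(tok, i):
--                 return True
--     return False
-- ===== Notes on version B (the rewrite author's own statement) =====
-- stated objective: alternative
-- what changed: Replaces the any()-over-tokens loop of six independent substring scans by a single left-to-right pass over the lowered text that, at each position, looks up the current character in a first-character dispatch dict and tests startswith only for the tokens that can begin with that character.
import Mathlib
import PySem

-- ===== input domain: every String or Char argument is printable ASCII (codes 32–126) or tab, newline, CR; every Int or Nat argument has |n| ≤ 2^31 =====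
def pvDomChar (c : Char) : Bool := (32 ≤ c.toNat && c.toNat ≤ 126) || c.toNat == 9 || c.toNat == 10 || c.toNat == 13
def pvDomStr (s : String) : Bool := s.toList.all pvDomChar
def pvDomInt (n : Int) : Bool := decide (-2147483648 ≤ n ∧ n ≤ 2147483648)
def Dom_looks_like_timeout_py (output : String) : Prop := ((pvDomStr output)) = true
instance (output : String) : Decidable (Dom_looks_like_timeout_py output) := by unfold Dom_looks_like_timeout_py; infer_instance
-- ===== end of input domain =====

-- B replaces the six per-token substring scans by one left-to-right pass over the
-- text with a first-character dispatch dict: an alternative algorithm, same value.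

-- ===== PORT A =====
def looks_like_timeout_py (output : String) : Bool :=
  let text := PySem.Str.lower output
  let timeout_tokens : List String :=
    ["timed out", "readtimeout", "connect timeout",
     "connection timed out", "operation timed out", "timeouterror"]
  timeout_tokens.any (fun token => PySem.Str.isIn token text)

-- ===== PORT B =====
-- B's dispatch dict: first character ↦ tokens that can start there
def pvByFirst : PySem.Dict Char (List String) := PySem.Dict.ofList
  [('t', ["timed out", "timeouterror"]),
   ('r', ["readtimeout"]),
   ('c', ["connect timeout", "connection timed out"]),
   ('o', ["operation timed out"])]

def looks_like_timeout_py_alt (output : String) : Bool :=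
  let text : List Char := (PySem.Str.lower output).toList
  -- for i, ch in enumerate(text): for tok in by_first.get(ch, ()): if text.startswith(tok, i): return True
  -- enumerate indices are ≥ 0, so '.toNat' is exact; text.startswith(tok, i) is "tok is a prefix of text[i:]"
  (PySem.List.enumerate text 0).any (fun p =>
    (PySem.Dict.getD pvByFirst p.2 []).any (fun tok =>
      PySem.Chars.startswith (text.drop p.1.toNat) tok.toList))

-- ===== PRECONDITION & SPEC =====
def Spec_looks_like_timeout_py (output : String) (out : Bool) : Prop := out = looks_like_timeout_py_alt output
instance (output : String) (out : Bool) : Decidable (Spec_looks_like_timeout_py output out) := by unfold Spec_looks_like_timeout_py; infer_instance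

-- ===== CLAIM (what is proved, stated in full; the proofs are below) =====
def Claim_equal_looks_like_timeout_py : Prop := ∀ (output : String), Dom_looks_like_timeout_py output → Spec_looks_like_timeout_py output (looks_like_timeout_py output)

-- ===== LEMMAS AND PROOFS =====

-- a token with first char c occurs in s iff it is a prefix of some suffix s[k:] with s[k] = c
theorem pv_occ_iff (c : Char) (tok s : List Char) (h : tok.head? = some c) :
    (PySem.Chars.isIn tok s = true) ↔
      ∃ k : Nat, ∃ hk : k < s.length, s[k] = c ∧ tok <+: s.drop k := by
  rw [← PySem.Chars.exists_prefix_drop_iff_isIn]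
  obtain ⟨t, rfl⟩ : ∃ t, tok = c :: t := by
    cases tok with
    | nil => simp at h
    | cons a b =>
      have : a = c := by simpa using h
      exact ⟨b, by rw [this]⟩
  constructor
  · rintro ⟨j, rest, hrest⟩
    have hlt : j < s.length := by
      by_contra hge
      have hnil : s.drop j = [] := List.drop_eq_nil_of_le (by omega)
      rw [hnil] at hrest; simp at hrest
    refine ⟨j, hlt, ?_, ⟨rest, hrest⟩⟩
    rw [List.drop_eq_getElem_cons hlt] at hrest
    have h2 : c :: (t ++ rest) = s[j] :: s.drop (j + 1) := by simpa using hrest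
    exact (List.cons.inj h2).1.symm
  · rintro ⟨k, hk, _, hpre⟩
    exact ⟨k, hpre⟩

-- inserting one hit into B's scan
theorem pv_alt_hit (output : String) (k : Nat)
    (hk : k < ((PySem.Str.lower output).toList).length) (tok : String)
    (htok : tok ∈ PySem.Dict.getD pvByFirst (((PySem.Str.lower output).toList)[k]) [])
    (hsw : tok.toList <+: ((PySem.Str.lower output).toList).drop k) :
    looks_like_timeout_py_alt output = true := by
  unfold looks_like_timeout_py_alt
  refine List.any_eq_true.mpr
    ⟨((0 : Int) + (k : Int), ((PySem.Str.lower output).toList)[k]),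
     (PySem.List.mem_enumerate_iff _ _ _).mpr ⟨k, hk, rfl⟩, ?_⟩
  refine List.any_eq_true.mpr ⟨tok, htok, ?_⟩
  have hidx : ((0 : Int) + (k : Int)).toNat = k := by simp
  rw [hidx, PySem.Chars.startswith_iff]
  exact hsw

-- the six cases of the dispatch dict, keyed away from {'t','r','c','o'}, are empty
theorem pv_byFirst_other (ch : Char) (h1 : ch ≠ 't') (h2 : ch ≠ 'r') (h3 : ch ≠ 'c') (h4 : ch ≠ 'o') :
    PySem.Dict.getD pvByFirst ch [] = [] := by
  have hmk : pvByFirst = PySem.Dict.mk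
    [('t', ["timed out", "timeouterror"]), ('r', ["readtimeout"]),
     ('c', ["connect timeout", "connection timed out"]), ('o', ["operation timed out"])] := by decide
  simp [hmk, PySem.Dict.getD, PySem.Dict.get?, Ne.symm h1, Ne.symm h2, Ne.symm h3, Ne.symm h4]

theorem looks_like_timeout_py_eq (output : String) :
    looks_like_timeout_py output = looks_like_timeout_py_alt output := by
  rw [Bool.eq_iff_iff]
  have hA : looks_like_timeout_py output = true ↔
      (PySem.Chars.isIn "timed out".toList (PySem.Str.lower output).toList = true ∨
       PySem.Chars.isIn "readtimeout".toList (PySem.Str.lower output).toList = true ∨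
       PySem.Chars.isIn "connect timeout".toList (PySem.Str.lower output).toList = true ∨
       PySem.Chars.isIn "connection timed out".toList (PySem.Str.lower output).toList = true ∨
       PySem.Chars.isIn "operation timed out".toList (PySem.Str.lower output).toList = true ∨
       PySem.Chars.isIn "timeouterror".toList (PySem.Str.lower output).toList = true) := by
    unfold looks_like_timeout_py
    simp [List.any_cons]
  rw [hA]
  constructor
  · rintro (hIsIn | hIsIn | hIsIn | hIsIn | hIsIn | hIsIn)
    · obtain ⟨k, hk, hc, hp⟩ := (pv_occ_iff 't' _ _ (by decide)).mp hIsIn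
      exact pv_alt_hit output k hk "timed out" (by rw [hc]; decide) hp
    · obtain ⟨k, hk, hc, hp⟩ := (pv_occ_iff 'r' _ _ (by decide)).mp hIsIn
      exact pv_alt_hit output k hk "readtimeout" (by rw [hc]; decide) hp
    · obtain ⟨k, hk, hc, hp⟩ := (pv_occ_iff 'c' _ _ (by decide)).mp hIsIn
      exact pv_alt_hit output k hk "connect timeout" (by rw [hc]; decide) hp
    · obtain ⟨k, hk, hc, hp⟩ := (pv_occ_iff 'c' _ _ (by decide)).mp hIsIn
      exact pv_alt_hit output k hk "connection timed out" (by rw [hc]; decide) hp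
    · obtain ⟨k, hk, hc, hp⟩ := (pv_occ_iff 'o' _ _ (by decide)).mp hIsIn
      exact pv_alt_hit output k hk "operation timed out" (by rw [hc]; decide) hp
    · obtain ⟨k, hk, hc, hp⟩ := (pv_occ_iff 't' _ _ (by decide)).mp hIsIn
      exact pv_alt_hit output k hk "timeouterror" (by rw [hc]; decide) hp
  · intro hB
    unfold looks_like_timeout_py_alt at hB
    obtain ⟨p, hmem, hin⟩ := List.any_eq_true.mp hB
    obtain ⟨k, hk, hpk⟩ := (PySem.List.mem_enumerate_iff _ _ p).mp hmem
    subst hpk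
    have hidx : ((0 : Int) + (k : Int)).toNat = k := by simp
    rw [hidx] at hin
    obtain ⟨tok, htok, hswb⟩ := List.any_eq_true.mp hin
    rw [PySem.Chars.startswith_iff] at hswb
    by_cases h1 : (PySem.Str.lower output).toList[k] = 't'
    · rw [h1] at htok
      have hget : PySem.Dict.getD pvByFirst 't' [] = ["timed out", "timeouterror"] := by decide
      rw [hget] at htok
      simp at htok
      rcases htok with rfl | rfl
      · exact Or.inl ((pv_occ_iff 't' _ _ (by decide)).mpr ⟨k, hk, h1, hswb⟩)
      · exact Or.inr (Or.inr (Or.inr (Or.inr (Or.inr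
          ((pv_occ_iff 't' _ _ (by decide)).mpr ⟨k, hk, h1, hswb⟩)))))
    by_cases h2 : (PySem.Str.lower output).toList[k] = 'r'
    · rw [h2] at htok
      have hget : PySem.Dict.getD pvByFirst 'r' [] = ["readtimeout"] := by decide
      rw [hget] at htok
      simp at htok
      subst htok
      exact Or.inr (Or.inl ((pv_occ_iff 'r' _ _ (by decide)).mpr ⟨k, hk, h2, hswb⟩))
    by_cases h3 : (PySem.Str.lower output).toList[k] = 'c'
    · rw [h3] at htok
      have hget : PySem.Dict.getD pvByFirst 'c' [] = ["connect timeout", "connection timed out"] := by decide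
      rw [hget] at htok
      simp at htok
      rcases htok with rfl | rfl
      · exact Or.inr (Or.inr (Or.inl ((pv_occ_iff 'c' _ _ (by decide)).mpr ⟨k, hk, h3, hswb⟩)))
      · exact Or.inr (Or.inr (Or.inr (Or.inl
          ((pv_occ_iff 'c' _ _ (by decide)).mpr ⟨k, hk, h3, hswb⟩))))
    by_cases h4 : (PySem.Str.lower output).toList[k] = 'o'
    · rw [h4] at htok
      have hget : PySem.Dict.getD pvByFirst 'o' [] = ["operation timed out"] := by decide
      rw [hget] at htok
      simp at htok
      subst htok
      exact Or.inr (Or.inr (Or.inr (Or.inr (Or.inl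
        ((pv_occ_iff 'o' _ _ (by decide)).mpr ⟨k, hk, h4, hswb⟩)))))
    · rw [pv_byFirst_other _ h1 h2 h3 h4] at htok
      simp at htok

-- ===== VERDICT (by name: the statement is the Claim_ definition above) =====
theorem looks_like_timeout_py_spec : Claim_equal_looks_like_timeout_py := by
  intro output _
  exact looks_like_timeout_py_eq output
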